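-- pv_equiv track=rewrite | github.com/postechdblab/themis | dogqc/dbio.py | gen_comparator_code
-- ===== SOURCE A (Python) =====
-- def gen_comparator_code(tname, table, key_attr_names, compare_id=''):
--     c = []
--     c.append('bool compare{}(int a, int b)'.format(compare_id) + ' {')
--
--     equals = ''
--
--     for idx, attr_name in enumerate(key_attr_names[0:], 0):
--         if idx == 0:
--             c.append('\tif ({}[a] < {}[b])'
--                 .format(attr_name, attr_name) + '{ return true; }')
--         else:
--             c.append('\telse if ({}{}[a] < {}[b]) '
--                 .format(equals, attr_name, attr_name)
--                 + '{ return true; }')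
--         equals += '{}[a] == {}[b] && '.format(attr_name, attr_name)
--     c.append('\treturn false;')
--     c.append('}')
--     return c
-- ===== SOURCE B (Python) =====
-- def gen_comparator_code(tname, table, key_attr_names, compare_id=''):
--     header = 'bool compare{}(int a, int b) {{'.format(compare_id)
--     body = [
--         '\tif ({0}[a] < {0}[b]){{ return true; }}'.format(name) if idx == 0
--         else '\telse if ({}{}[a] < {}[b]) {{ return true; }}'.format(
--             ''.join('{0}[a] == {0}[b] && '.format(p) for p in key_attr_names[:idx]),
--             name, name)
--         for idx, name in enumerate(key_attr_names)
--     ]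
--     return [header] + body + ['\treturn false;', '}']
-- ===== Notes on version B (the rewrite author's own statement) =====
-- stated objective: alternative
-- what changed: The stateful running 'equals' accumulator is removed: B builds the body as a single comprehension where each line's equality prefix is reconstructed from scratch by joining over the slice key_attr_names[:idx], and assembles the result list by concatenation instead of repeated append.
import Mathlib
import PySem

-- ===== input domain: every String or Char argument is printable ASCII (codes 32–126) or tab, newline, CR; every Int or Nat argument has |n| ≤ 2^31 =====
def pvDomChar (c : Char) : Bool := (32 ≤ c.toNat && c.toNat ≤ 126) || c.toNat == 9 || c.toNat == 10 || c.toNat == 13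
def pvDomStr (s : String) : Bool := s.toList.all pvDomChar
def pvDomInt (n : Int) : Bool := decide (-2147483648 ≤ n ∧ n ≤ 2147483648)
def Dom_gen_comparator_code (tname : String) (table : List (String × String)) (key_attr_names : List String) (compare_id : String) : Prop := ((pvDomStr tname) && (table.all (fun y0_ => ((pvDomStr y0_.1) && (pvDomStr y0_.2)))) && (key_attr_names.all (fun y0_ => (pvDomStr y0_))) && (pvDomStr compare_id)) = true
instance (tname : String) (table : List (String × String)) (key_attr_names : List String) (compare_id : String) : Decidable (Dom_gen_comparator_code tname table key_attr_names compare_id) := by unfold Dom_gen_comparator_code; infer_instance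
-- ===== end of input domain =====

-- B rebuilds the per-line equality prefix fresh from the slice key_attr_names[:idx]
-- inside a single comprehension, replacing A's mutable running accumulator (alternative decomposition).


-- ===== PORT A =====
-- the for-loop over enumerate(key_attr_names[0:], 0) with its two mutated variables (equals, c)
def pvALoop : List (Int × String) → String → List String → List String
  | [], _, c => c
  | (idx, attr_name) :: rest, equals, c =>
      pvALoop rest
        (equals ++ (attr_name ++ "[a] == " ++ attr_name ++ "[b] && "))
        (c ++ [if idx == 0 then
                 "\tif (" ++ attr_name ++ "[a] < " ++ attr_name ++ "[b])" ++ "{ return true; }"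
               else
                 "\telse if (" ++ equals ++ attr_name ++ "[a] < " ++ attr_name ++ "[b]) " ++ "{ return true; }"])

def gen_comparator_code (tname : String) (table : List (String × String)) (key_attr_names : List String) (compare_id : String) : List String :=
  let c : List String := []
  let c := c ++ ["bool compare" ++ compare_id ++ "(int a, int b)" ++ " {"]
  let c := pvALoop (PySem.List.enumerate (PySem.List.slice key_attr_names (some 0) none) 0) "" c
  let c := c ++ ["\treturn false;"]
  let c := c ++ ["}"]
  c

-- ===== PORT B =====
-- ''.join('{0}[a] == {0}[b] && '.format(p) for p in names)
def pvJoinEq (names : List String) : String :=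
  String.join (names.map (fun p => p ++ "[a] == " ++ p ++ "[b] && "))

def gen_comparator_code_alt (tname : String) (table : List (String × String)) (key_attr_names : List String) (compare_id : String) : List String :=
  let header := "bool compare" ++ compare_id ++ "(int a, int b) {"
  let body := (PySem.List.enumerate key_attr_names 0).map (fun p =>
    if p.1 == 0 then
      "\tif (" ++ p.2 ++ "[a] < " ++ p.2 ++ "[b]){ return true; }"
    else
      "\telse if (" ++ pvJoinEq (key_attr_names.take p.1.toNat) ++ p.2 ++ "[a] < " ++ p.2 ++ "[b]) { return true; }")
  [header] ++ body ++ ["\treturn false;", "}"]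

-- ===== PRECONDITION & SPEC =====
def Spec_gen_comparator_code (tname : String) (table : List (String × String)) (key_attr_names : List String) (compare_id : String) (out : List String) : Prop := out = gen_comparator_code_alt tname table key_attr_names compare_id
instance (tname : String) (table : List (String × String)) (key_attr_names : List String) (compare_id : String) (out : List String) : Decidable (Spec_gen_comparator_code tname table key_attr_names compare_id out) := by unfold Spec_gen_comparator_code; infer_instance

-- ===== CLAIM (what is proved, stated in full; the proofs are below) =====
def Claim_equal_gen_comparator_code : Prop := ∀ (tname : String) (table : List (String × String)) (key_attr_names : List String) (compare_id : String), Dom_gen_comparator_code tname table key_attr_names compare_id → Spec_gen_comparator_code tname table key_attr_names compare_id (gen_comparator_code tname table key_attr_names compare_id)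

-- ===== LEMMAS AND PROOFS =====

-- the body lines, indexed by the already-processed prefix `pre`
def pvBodyFrom : List String → List String → List String
  | _, [] => []
  | pre, n :: rest =>
      (if pre.length == 0 then
         "\tif (" ++ n ++ "[a] < " ++ n ++ "[b]){ return true; }"
       else
         "\telse if (" ++ pvJoinEq pre ++ n ++ "[a] < " ++ n ++ "[b]) { return true; }")
      :: pvBodyFrom (pre ++ [n]) rest

theorem pvJoinEq_append_singleton (pre : List String) (n : String) :
    pvJoinEq (pre ++ [n]) = pvJoinEq pre ++ (n ++ "[a] == " ++ n ++ "[b] && ") := by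
  simp [pvJoinEq, String.join, List.foldl_append]

theorem pvALoop_eq (suf pre c : List String) :
    pvALoop (PySem.List.enumerate suf (pre.length : Int)) (pvJoinEq pre) c
      = c ++ pvBodyFrom pre suf := by
  induction suf generalizing pre c with
  | nil => simp [PySem.List.enumerate_nil, pvALoop, pvBodyFrom]
  | cons n rest ih =>
      rw [PySem.List.enumerate_cons]
      show pvALoop _ _ _ = _
      rw [pvALoop]
      have hidx : (((pre.length : Int)) == 0) = (pre.length == 0) := by
        simp
      have hlen : ((pre.length : Int) + 1) = (((pre ++ [n]).length : Nat) : Int) := by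
        simp
      have hline :
          (if ((pre.length : Int)) == 0 then
             "\tif (" ++ n ++ "[a] < " ++ n ++ "[b])" ++ "{ return true; }"
           else
             "\telse if (" ++ pvJoinEq pre ++ n ++ "[a] < " ++ n ++ "[b]) " ++ "{ return true; }")
          = (if pre.length == 0 then
               "\tif (" ++ n ++ "[a] < " ++ n ++ "[b]){ return true; }"
             else
               "\telse if (" ++ pvJoinEq pre ++ n ++ "[a] < " ++ n ++ "[b]) { return true; }") := by
        rw [hidx]
        by_cases h : pre.length = 0
        · simp only [h, beq_self_eq_true, if_true]
          rw [String.append_assoc, show ("[b])" : String) ++ "{ return true; }" = "[b]){ return true; }" from rfl]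
        · simp only [beq_iff_eq, h, if_false]
          rw [String.append_assoc, show ("[b]) " : String) ++ "{ return true; }" = "[b]) { return true; }" from rfl]
      rw [hline, hlen, ← pvJoinEq_append_singleton, ih (pre ++ [n])]
      rw [pvBodyFrom]
      simp

theorem pvMap_eq (suf pre : List String) :
    (PySem.List.enumerate suf (pre.length : Int)).map (fun p =>
        if p.1 == 0 then
          "\tif (" ++ p.2 ++ "[a] < " ++ p.2 ++ "[b]){ return true; }"
        else
          "\telse if (" ++ pvJoinEq ((pre ++ suf).take p.1.toNat) ++ p.2 ++ "[a] < " ++ p.2 ++ "[b]) { return true; }")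
      = pvBodyFrom pre suf := by
  induction suf generalizing pre with
  | nil => simp [PySem.List.enumerate_nil, pvBodyFrom]
  | cons n rest ih =>
      rw [PySem.List.enumerate_cons, List.map_cons, pvBodyFrom, List.cons_eq_cons]
      constructor
      · have htake : ((pre ++ n :: rest).take ((pre.length : Int)).toNat) = pre := by
          simp [List.take_left']
        rw [htake]
        have hidx : (((pre.length : Int)) == 0) = (pre.length == 0) := by
          simp
        rw [hidx]
      · have := ih (pre ++ [n])
        simp only [List.append_assoc, List.singleton_append, List.length_append,
          List.length_singleton, Nat.cast_add, Nat.cast_one] at this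
        exact this

-- ===== VERDICT (by name: the statement is the Claim_ definition above) =====
theorem gen_comparator_code_spec : Claim_equal_gen_comparator_code := by
  intro tname table key_attr_names compare_id _
  show gen_comparator_code tname table key_attr_names compare_id
      = gen_comparator_code_alt tname table key_attr_names compare_id
  unfold gen_comparator_code gen_comparator_code_alt
  simp only [PySem.List.slice_zero_start, PySem.List.slice_none_none, List.nil_append]
  have hA := pvALoop_eq key_attr_names []
    ["bool compare" ++ compare_id ++ "(int a, int b)" ++ " {"]
  simp only [List.length_nil, Nat.cast_zero] at hA
  have hjoin : pvJoinEq ([] : List String) = "" := by simp [pvJoinEq, String.join]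
  rw [hjoin] at hA
  rw [hA]
  have hB := pvMap_eq key_attr_names []
  simp only [List.length_nil, Nat.cast_zero, List.nil_append] at hB
  rw [hB]
  rw [show ("bool compare" ++ compare_id ++ "(int a, int b)" ++ " {")
        = ("bool compare" ++ compare_id ++ "(int a, int b) {") from by
    rw [String.append_assoc, show ("(int a, int b)" : String) ++ " {" = "(int a, int b) {" from rfl]]
  simp
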